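-- pv_equiv track=rewrite | github.com/Reynouts/AoC19 | AoC19/day10.py | checksight
-- ===== SOURCE A (Python) =====
-- from math import gcd, atan2
--
-- def checksight(source, target, astroids):
--     distance = (target[0]-source[0], target[1]-source[1])
--     denom = gcd(*distance)
--     if denom == 1 or denom == 0:
--         return target
--     else:
--         step = [x//denom for x in distance]
--         position = source
--         while position != target:
--             position = tuple(map(sum, zip(position, step)))
--             if position == target:
--                 return target
--             elif position in astroids:
--                 return None
--         return target
-- ===== SOURCE B (Python) =====
-- def checksight(source, target, astroids):
--     dx = target[0] - source[0]
--     dy = target[1] - source[1]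
--     dd = dx * dx + dy * dy
--     for a in astroids:
--         px = a[0] - source[0]
--         py = a[1] - source[1]
--         if px * dy - py * dx == 0 and 0 < px * dx + py * dy < dd:
--             return None
--     return target
-- ===== Notes on version B (the rewrite author's own statement) =====
-- stated objective: alternative
-- what changed: B replaces A's O(gcd)-step walk along the segment (with a list-membership test at every lattice point) by a single pass over the asteroid list, testing each asteroid for exact collinearity (integer cross product) and strict betweenness (dot product bounds).
import Mathlib
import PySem

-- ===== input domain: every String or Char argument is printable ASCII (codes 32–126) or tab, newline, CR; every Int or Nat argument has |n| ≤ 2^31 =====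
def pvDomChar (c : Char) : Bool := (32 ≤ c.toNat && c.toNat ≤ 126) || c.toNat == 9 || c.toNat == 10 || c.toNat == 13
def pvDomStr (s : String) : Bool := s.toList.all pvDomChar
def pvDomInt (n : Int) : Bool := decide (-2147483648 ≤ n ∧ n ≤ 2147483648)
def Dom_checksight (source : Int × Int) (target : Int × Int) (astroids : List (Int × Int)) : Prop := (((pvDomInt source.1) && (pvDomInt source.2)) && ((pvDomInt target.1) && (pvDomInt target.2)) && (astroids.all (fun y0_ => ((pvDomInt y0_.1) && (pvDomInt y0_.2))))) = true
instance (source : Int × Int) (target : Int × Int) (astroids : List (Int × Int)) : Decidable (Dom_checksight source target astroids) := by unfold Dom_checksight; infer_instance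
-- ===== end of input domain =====

-- B replaces A's step-by-step walk along the line of sight by a single scan of the asteroid
-- list, testing each asteroid for collinearity (cross product) and strict betweenness (dot
-- product); an alternative algorithm with the same return value.

-- ===== PORT A =====
def checksightLoop (target : Int × Int) (astroids : List (Int × Int)) (step : Int × Int) :
    Int × Int → Nat → Option (Int × Int)
  | pos, fuel =>
    if pos = target then some target
    else
      match fuel with
      | 0 => some target  -- unreachable: the caller supplies enough fuel for the walk to reach target
      | fuel + 1 =>
        let pos' : Int × Int := (pos.1 + step.1, pos.2 + step.2)
        if pos' = target then some target
        else if pos' ∈ astroids then none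
        else checksightLoop target astroids step pos' fuel

def checksight (source : Int × Int) (target : Int × Int) (astroids : List (Int × Int)) : Option (Int × Int) :=
  let distance : Int × Int := (target.1 - source.1, target.2 - source.2)
  let denom : Int := (Int.gcd distance.1 distance.2 : Int)
  if denom = 1 ∨ denom = 0 then some target
  else
    let step : Int × Int := (PySem.Int.floordiv distance.1 denom, PySem.Int.floordiv distance.2 denom)
    checksightLoop target astroids step source denom.toNat

-- ===== PORT B =====
def checksight_alt (source : Int × Int) (target : Int × Int) (astroids : List (Int × Int)) : Option (Int × Int) :=
  let dx := target.1 - source.1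
  let dy := target.2 - source.2
  let dd := dx * dx + dy * dy
  if astroids.any (fun a =>
      let px := a.1 - source.1
      let py := a.2 - source.2
      decide (px * dy - py * dx = 0) && decide (0 < px * dx + py * dy) && decide (px * dx + py * dy < dd))
  then none else some target

-- ===== PRECONDITION & SPEC =====
def Spec_checksight (source : Int × Int) (target : Int × Int) (astroids : List (Int × Int)) (out : Option (Int × Int)) : Prop := out = checksight_alt source target astroids
instance (source : Int × Int) (target : Int × Int) (astroids : List (Int × Int)) (out : Option (Int × Int)) : Decidable (Spec_checksight source target astroids out) := by unfold Spec_checksight; infer_instance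

-- ===== CLAIM (what is proved, stated in full; the proofs are below) =====
def Claim_equal_checksight : Prop := ∀ (source : Int × Int) (target : Int × Int) (astroids : List (Int × Int)), Dom_checksight source target astroids → Spec_checksight source target astroids (checksight source target astroids)

-- ===== LEMMAS AND PROOFS =====

/-- If `(sx, sy)` is a primitive direction and `(px, py)` is collinear with it,
then `(px, py)` is an integer multiple of it. -/
lemma rep_of_cross_zero (sx sy px py : Int) (hcop : Int.gcd sx sy = 1)
    (hc : px * sy = py * sx) : ∃ k : Int, px = k * sx ∧ py = k * sy := by
  by_cases hsx : sx = 0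
  · subst hsx
    have hsy : sy = 1 ∨ sy = -1 := by
      have h1 : sy.natAbs = 1 := by simpa [Int.gcd] using hcop
      omega
    have hpx : px = 0 := by
      rcases hsy with h | h <;> simp [h] at hc <;> omega
    refine ⟨py * sy, by simp [hpx], ?_⟩
    rcases hsy with h | h <;> simp [h]
  · have hco : IsCoprime sx sy := Int.isCoprime_iff_gcd_eq_one.mpr hcop
    have hdvd : sx ∣ px := hco.dvd_of_dvd_mul_right ⟨py, by linarith⟩
    obtain ⟨k, hk⟩ := hdvd
    refine ⟨k, by rw [hk, mul_comm], ?_⟩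
    have h2 : py * sx = k * sy * sx := by rw [← hc, hk]; ring
    exact mul_right_cancel₀ hsx h2

/-- B's per-asteroid test (collinear + strictly between) holds iff the relative
position is `k` primitive steps with `0 < k < g`. -/
lemma test_iff (dx dy sx sy g px py : Int) (hg : 0 < g)
    (hdx : dx = g * sx) (hdy : dy = g * sy) (hcop : Int.gcd sx sy = 1) :
    (px * dy - py * dx = 0 ∧ 0 < px * dx + py * dy ∧ px * dx + py * dy < dx * dx + dy * dy)
      ↔ ∃ k : Int, 0 < k ∧ k < g ∧ px = k * sx ∧ py = k * sy := by
  have hm : 0 < sx * sx + sy * sy := by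
    rcases (show sx ≠ 0 ∨ sy ≠ 0 by
      by_contra h
      push_neg at h
      simp [h.1, h.2, Int.gcd] at hcop) with h | h
    · have := mul_self_pos.mpr h
      nlinarith [mul_self_nonneg sy]
    · have := mul_self_pos.mpr h
      nlinarith [mul_self_nonneg sx]
  have hM : 0 < g * (sx * sx + sy * sy) := mul_pos hg hm
  constructor
  · rintro ⟨hc, h1, h2⟩
    have hc' : px * sy = py * sx := by
      have : g * (px * sy - py * sx) = 0 := by rw [hdx, hdy] at hc; linarith [hc]; 
      have := mul_eq_zero.mp this
      rcases this with h | h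
      · omega
      · linarith
    obtain ⟨k, hpx, hpy⟩ := rep_of_cross_zero sx sy px py hcop hc'
    have hdot : px * dx + py * dy = k * (g * (sx * sx + sy * sy)) := by
      rw [hpx, hpy, hdx, hdy]; ring
    have hdd : dx * dx + dy * dy = g * (g * (sx * sx + sy * sy)) := by
      rw [hdx, hdy]; ring
    refine ⟨k, ?_, ?_, hpx, hpy⟩
    · nlinarith [h1, hdot, hM]
    · have h2' : k * (g * (sx * sx + sy * sy)) < g * (g * (sx * sx + sy * sy)) := by
        rw [← hdot, ← hdd]; exact h2
      exact lt_of_mul_lt_mul_right h2' (le_of_lt hM)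
  · rintro ⟨k, hk0, hkg, hpx, hpy⟩
    subst hpx hpy hdx hdy
    refine ⟨by ring, ?_, ?_⟩
    · have e : k * sx * (g * sx) + k * sy * (g * sy) = k * (g * (sx * sx + sy * sy)) := by ring
      rw [e]; exact mul_pos hk0 hM
    · nlinarith [hM, hk0, hkg]

/-- A point on the primitive lattice equals the endpoint iff its index is `g`. -/
lemma point_eq_iff (t s : Int × Int) (sx sy g : Int) (hne : sx ≠ 0 ∨ sy ≠ 0)
    (ht1 : t.1 = s.1 + g * sx) (ht2 : t.2 = s.2 + g * sy) (a : Int) :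
    ((s.1 + a * sx, s.2 + a * sy) : Int × Int) = t ↔ a = g := by
  constructor
  · intro h
    rw [Prod.ext_iff] at h
    simp only [ht1, ht2] at h
    have h1 : (a - g) * sx = 0 := by have := h.1; linarith
    have h2 : (a - g) * sy = 0 := by have := h.2; linarith
    rcases hne with hx | hx
    · have := mul_eq_zero.mp h1
      rcases this with h' | h' <;> [omega; exact absurd h' hx]
    · have := mul_eq_zero.mp h2
      rcases this with h' | h' <;> [omega; exact absurd h' hx]
  · intro h
    subst h
    rw [Prod.ext_iff]
    exact ⟨ht1.symm, ht2.symm⟩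

/-- Characterisation of A's walk: starting `k` primitive steps from the source with
enough fuel, it returns `none` iff some strictly-later interior lattice point is an
asteroid, and otherwise returns `some t`. -/
lemma loop_char (t : Int × Int) (as : List (Int × Int)) (sx sy g : Int) (s : Int × Int)
    (hne : sx ≠ 0 ∨ sy ≠ 0)
    (ht1 : t.1 = s.1 + g * sx) (ht2 : t.2 = s.2 + g * sy) :
    ∀ (fuel : Nat) (k : Int), 0 ≤ k → k ≤ g → g ≤ k + (fuel : Int) →
      (checksightLoop t as (sx, sy) (s.1 + k * sx, s.2 + k * sy) fuel = none
          ↔ ∃ j : Int, k < j ∧ j < g ∧ ((s.1 + j * sx, s.2 + j * sy) : Int × Int) ∈ as)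
        ∧ (checksightLoop t as (sx, sy) (s.1 + k * sx, s.2 + k * sy) fuel = none
            ∨ checksightLoop t as (sx, sy) (s.1 + k * sx, s.2 + k * sy) fuel = some t) := by
  intro fuel
  induction fuel with
  | zero =>
    intro k hk0 hkg hfuel
    have hk : k = g := by omega
    subst hk
    have hp : ((s.1 + k * sx, s.2 + k * sy) : Int × Int) = t :=
      (point_eq_iff t s sx sy k hne ht1 ht2 k).mpr rfl
    rw [checksightLoop, if_pos hp]
    refine ⟨?_, Or.inr rfl⟩
    simp only [reduceCtorEq, false_iff]
    rintro ⟨j, hj1, hj2, _⟩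
    omega
  | succ fuel ih =>
    intro k hk0 hkg hfuel
    by_cases hk : k = g
    · subst hk
      have hp : ((s.1 + k * sx, s.2 + k * sy) : Int × Int) = t :=
        (point_eq_iff t s sx sy k hne ht1 ht2 k).mpr rfl
      rw [checksightLoop, if_pos hp]
      refine ⟨?_, Or.inr rfl⟩
      simp only [reduceCtorEq, false_iff]
      rintro ⟨j, hj1, hj2, _⟩
      omega
    · have hklt : k < g := lt_of_le_of_ne hkg hk
      have hp : ((s.1 + k * sx, s.2 + k * sy) : Int × Int) ≠ t := by
        intro h
        exact hk ((point_eq_iff t s sx sy g hne ht1 ht2 k).mp h)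
      rw [checksightLoop, if_neg hp]
      simp only
      have e1 : s.1 + k * sx + sx = s.1 + (k + 1) * sx := by ring
      have e2 : s.2 + k * sy + sy = s.2 + (k + 1) * sy := by ring
      rw [e1, e2]
      by_cases hkt : k + 1 = g
      · have hp' : ((s.1 + (k + 1) * sx, s.2 + (k + 1) * sy) : Int × Int) = t :=
          (point_eq_iff t s sx sy g hne ht1 ht2 (k + 1)).mpr hkt
        rw [if_pos hp']
        refine ⟨?_, Or.inr rfl⟩
        simp only [reduceCtorEq, false_iff]
        rintro ⟨j, hj1, hj2, _⟩
        omega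
      · have hp' : ((s.1 + (k + 1) * sx, s.2 + (k + 1) * sy) : Int × Int) ≠ t := by
          intro h
          exact hkt ((point_eq_iff t s sx sy g hne ht1 ht2 (k + 1)).mp h)
        rw [if_neg hp']
        by_cases hmem : ((s.1 + (k + 1) * sx, s.2 + (k + 1) * sy) : Int × Int) ∈ as
        · rw [if_pos hmem]
          exact ⟨⟨fun _ => ⟨k + 1, by omega, by omega, hmem⟩, fun _ => rfl⟩, Or.inl rfl⟩
        · rw [if_neg hmem]
          obtain ⟨hiff, hcase⟩ := ih (k + 1) (by omega) (by omega) (by push_cast at hfuel ⊢; omega)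
          refine ⟨hiff.trans ?_, hcase⟩
          constructor
          · rintro ⟨j, hj1, hj2, hjm⟩
            exact ⟨j, by omega, hj2, hjm⟩
          · rintro ⟨j, hj1, hj2, hjm⟩
            by_cases hj : j = k + 1
            · subst hj; exact absurd hjm hmem
            · exact ⟨j, by omega, hj2, hjm⟩

/-- B's scan fires iff some interior lattice point of the segment is an asteroid. -/
lemma any_iff (s t : Int × Int) (as : List (Int × Int)) (sx sy g : Int) (hg : 0 < g)
    (hdx : t.1 - s.1 = g * sx) (hdy : t.2 - s.2 = g * sy) (hcop : Int.gcd sx sy = 1) :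
    (as.any (fun a =>
        decide ((a.1 - s.1) * (t.2 - s.2) - (a.2 - s.2) * (t.1 - s.1) = 0) &&
        decide (0 < (a.1 - s.1) * (t.1 - s.1) + (a.2 - s.2) * (t.2 - s.2)) &&
        decide ((a.1 - s.1) * (t.1 - s.1) + (a.2 - s.2) * (t.2 - s.2) <
          (t.1 - s.1) * (t.1 - s.1) + (t.2 - s.2) * (t.2 - s.2))) = true)
      ↔ ∃ j : Int, 0 < j ∧ j < g ∧ ((s.1 + j * sx, s.2 + j * sy) : Int × Int) ∈ as := by
  rw [List.any_eq_true]
  constructor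
  · rintro ⟨a, ha, hpa⟩
    simp only [Bool.and_eq_true, decide_eq_true_eq] at hpa
    obtain ⟨⟨hc, h1⟩, h2⟩ := hpa
    obtain ⟨k, hk0, hkg, hpx, hpy⟩ :=
      (test_iff (t.1 - s.1) (t.2 - s.2) sx sy g (a.1 - s.1) (a.2 - s.2)
        hg hdx hdy hcop).mp ⟨hc, h1, h2⟩
    refine ⟨k, hk0, hkg, ?_⟩
    have : ((s.1 + k * sx, s.2 + k * sy) : Int × Int) = a := by
      rw [Prod.ext_iff]
      constructor <;> simp <;> omega
    rw [this]; exact ha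
  · rintro ⟨j, hj0, hjg, hmem⟩
    refine ⟨_, hmem, ?_⟩
    simp only [Bool.and_eq_true, decide_eq_true_eq]
    have h := (test_iff (t.1 - s.1) (t.2 - s.2) sx sy g (s.1 + j * sx - s.1) (s.2 + j * sy - s.2)
        hg hdx hdy hcop).mpr ⟨j, hj0, hjg, by ring, by ring⟩
    exact ⟨⟨h.1, h.2.1⟩, h.2.2⟩

lemma checksight_eq_alt (s t : Int × Int) (as : List (Int × Int)) :
    checksight s t as = checksight_alt s t as := by
  simp only [checksight, checksight_alt]
  set dx := t.1 - s.1 with hdxdef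
  set dy := t.2 - s.2 with hdydef
  by_cases h0 : ((Int.gcd dx dy : Int) = 1 ∨ (Int.gcd dx dy : Int) = 0)
  · rw [if_pos h0]
    have hfalse : as.any (fun a =>
        decide ((a.1 - s.1) * dy - (a.2 - s.2) * dx = 0) &&
        decide (0 < (a.1 - s.1) * dx + (a.2 - s.2) * dy) &&
        decide ((a.1 - s.1) * dx + (a.2 - s.2) * dy < dx * dx + dy * dy)) = false := by
      rw [List.any_eq_false]
      intro a _ hpa
      simp only [Bool.and_eq_true, decide_eq_true_eq] at hpa
      obtain ⟨⟨hc, h1⟩, h2⟩ := hpa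
      rcases h0 with hg1 | hg0
      · have hcop : Int.gcd dx dy = 1 := by exact_mod_cast hg1
        obtain ⟨k, hk0, hkg, _, _⟩ :=
          (test_iff dx dy dx dy 1 (a.1 - s.1) (a.2 - s.2) (by omega)
            (by ring) (by ring) hcop).mp ⟨hc, h1, h2⟩
        omega
      · have hz : dx = 0 ∧ dy = 0 := Int.gcd_eq_zero_iff.mp (by exact_mod_cast hg0)
        rw [hz.1, hz.2] at h1 h2
        simp at h1
    rw [hfalse]
    simp
  · rw [if_neg h0]
    have hgnn : (0 : Int) ≤ (Int.gcd dx dy : Int) := Int.natCast_nonneg _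
    have hgpos : (0 : Int) < (Int.gcd dx dy : Int) := by omega
    set g : Int := (Int.gcd dx dy : Int) with hgdef
    set sx : Int := PySem.Int.floordiv dx g with hsxdef
    set sy : Int := PySem.Int.floordiv dy g with hsydef
    have hdx : dx = g * sx := (Int.mul_fdiv_cancel' (Int.gcd_dvd_left dx dy)).symm
    have hdy : dy = g * sy := (Int.mul_fdiv_cancel' (Int.gcd_dvd_right dx dy)).symm
    have hcop : Int.gcd sx sy = 1 := by
      have e1 : sx = dx / g := by
        rw [hdx]; rw [Int.mul_ediv_cancel_left _ (by omega : g ≠ 0)]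
      have e2 : sy = dy / g := by
        rw [hdy]; rw [Int.mul_ediv_cancel_left _ (by omega : g ≠ 0)]
      rw [e1, e2, hgdef]
      exact Int.gcd_div_gcd_div_gcd (Int.natCast_pos.mp hgpos)
    have hne : sx ≠ 0 ∨ sy ≠ 0 := by
      by_contra h
      push_neg at h
      rw [h.1, mul_zero] at hdx
      rw [h.2, mul_zero] at hdy
      have : Int.gcd dx dy = 0 := by rw [hdx, hdy]; simp [Int.gcd]
      omega
    have ht1 : t.1 = s.1 + g * sx := by rw [← hdx]; omega
    have ht2 : t.2 = s.2 + g * sy := by rw [← hdy]; omega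
    have hsrc : s = ((s.1 + 0 * sx, s.2 + 0 * sy) : Int × Int) := by simp
    obtain ⟨hiff, hcase⟩ := loop_char t as sx sy g s hne ht1 ht2 g.toNat 0
      le_rfl (by omega) (by rw [Int.toNat_of_nonneg (by omega)]; omega)
    rw [← hsrc] at hiff hcase
    have hany := any_iff s t as sx sy g hgpos hdx hdy hcop
    rw [← hdxdef, ← hdydef] at hany
    by_cases hb : as.any (fun a =>
        decide ((a.1 - s.1) * dy - (a.2 - s.2) * dx = 0) &&
        decide (0 < (a.1 - s.1) * dx + (a.2 - s.2) * dy) &&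
        decide ((a.1 - s.1) * dx + (a.2 - s.2) * dy < dx * dx + dy * dy)) = true
    · rw [hb, if_pos rfl]
      obtain ⟨j, hj0, hjg, hjm⟩ := hany.mp hb
      exact hiff.mpr ⟨j, hj0, hjg, hjm⟩
    · rw [Bool.not_eq_true] at hb
      rw [hb, if_neg (by simp)]
      rcases hcase with h | h
      · exfalso
        obtain ⟨j, hj0, hjg, hjm⟩ := hiff.mp h
        have htrue := hany.mpr ⟨j, hj0, hjg, hjm⟩
        rw [hb] at htrue
        exact Bool.false_ne_true htrue
      · exact h

-- ===== VERDICT (by name: the statement is the Claim_ definition above) =====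
theorem checksight_spec : Claim_equal_checksight := by
  intro s t as _
  unfold Spec_checksight
  exact checksight_eq_alt s t as
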